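-- pv_equiv track=rewrite | github.com/jcolinpatrick/kryptos | scripts/e_s_137_point_crib_placement.py | check_periodicity
-- ===== SOURCE A (Python) =====
-- def check_periodicity(combined_keys, max_period=26):
--     """Check if keystream is consistent with any period p."""
--     positions = sorted(combined_keys.keys())
--     results = {}
--     for p in range(2, max_period + 1):
--         consistent = True
--         # Group positions by residue mod p
--         residue_groups = {}
--         for pos in positions:
--             r = pos % p
--             if r not in residue_groups:
--                 residue_groups[r] = set()
--             residue_groups[r].add(combined_keys[pos])
--         # Check if any residue group has conflicting values
--         for r, vals in residue_groups.items():
--             if len(vals) > 1: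
--                 consistent = False
--                 break
--         results[p] = consistent
--     return results
-- ===== SOURCE B (Python) =====
-- def check_periodicity(combined_keys, max_period=26):
--     """Check if keystream is consistent with any period p.
--
--     One nested scan collects every absolute difference between positions
--     holding different values; period p is consistent iff p divides none of them.
--     """
--     items = list(combined_keys.items())
--     bad_diffs = set()
--     for pos_i, val_i in items:
--         for pos_j, val_j in items:
--             if val_i != val_j:
--                 bad_diffs.add(abs(pos_i - pos_j))
--     return {p: all(d % p != 0 for d in bad_diffs) for p in range(2, max_period + 1)}
-- ===== Notes on version B (the rewrite author's own statement) =====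
-- stated objective: alternative
-- what changed: Instead of grouping positions by residue mod p for every period, B makes one nested scan collecting the set of absolute position-differences between conflicting values and then tests each period only for divisibility against that set.
import Mathlib
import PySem

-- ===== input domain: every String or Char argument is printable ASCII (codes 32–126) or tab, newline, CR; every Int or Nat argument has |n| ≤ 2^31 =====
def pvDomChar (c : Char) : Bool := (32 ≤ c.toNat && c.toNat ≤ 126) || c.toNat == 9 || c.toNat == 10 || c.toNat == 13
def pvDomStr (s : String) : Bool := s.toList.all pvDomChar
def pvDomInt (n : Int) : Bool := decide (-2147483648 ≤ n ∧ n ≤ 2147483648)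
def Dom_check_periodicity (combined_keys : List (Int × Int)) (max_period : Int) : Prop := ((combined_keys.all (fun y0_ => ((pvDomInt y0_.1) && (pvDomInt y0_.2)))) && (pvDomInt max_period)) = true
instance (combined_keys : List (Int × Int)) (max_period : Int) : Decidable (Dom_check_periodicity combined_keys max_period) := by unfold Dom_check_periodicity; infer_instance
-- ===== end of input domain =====

-- B replaces A's per-period residue grouping by one nested scan over position pairs that
-- collects the conflicting position-differences, then a divisibility test per period (alternative decomposition, similar cost).

-- ===== PORT A =====
-- the 'for r, vals in residue_groups.items(): if len(vals) > 1: consistent = False; break' loop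
def pvCheckGroups : List (Int × PySem.Set Int) → Bool
  | [] => true
  | (_, vals) :: rest => if 1 < PySem.Set.len vals then false else pvCheckGroups rest

def check_periodicity (combined_keys : List (Int × Int)) (max_period : Int) : List (Int × Bool) :=
  let d := PySem.Dict.mk combined_keys
  let positions := PySem.List.sorted d.keys (fun x => x) false
  ((PySem.List.pyRange 2 (max_period + 1) 1).foldl
    (fun (results : PySem.Dict Int Bool) p =>
      -- 'if r not in residue_groups: residue_groups[r] = set(); residue_groups[r].add(v)' is Dict.modify
      let residue_groups := positions.foldl
        (fun (g : PySem.Dict Int (PySem.Set Int)) pos =>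
          g.modify (PySem.Int.mod pos p) PySem.Set.empty
            -- combined_keys[pos]: pos ∈ keys, so the lookup never raises; getD's default is never used
            (fun s => PySem.Set.add s (d.getD pos 0)))
        PySem.Dict.empty
      results.insert p (pvCheckGroups residue_groups.items))
    PySem.Dict.empty).items

-- ===== PORT B =====
def check_periodicity_alt (combined_keys : List (Int × Int)) (max_period : Int) : List (Int × Bool) :=
  let items := (PySem.Dict.mk combined_keys).items
  let bad_diffs := items.foldl
    (fun (s : PySem.Set Int) pi =>
      items.foldl
        (fun (s : PySem.Set Int) pj =>
          if pi.2 ≠ pj.2 then PySem.Set.add s |pi.1 - pj.1| else s)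
        s)
    PySem.Set.empty
  -- dict comprehension over the distinct keys p of range(2, max_period+1): its items list is this map
  (PySem.List.pyRange 2 (max_period + 1) 1).map
    (fun p => (p, bad_diffs.all (fun dd => PySem.Int.mod dd p != 0)))

-- ===== PRECONDITION & SPEC =====
-- Pre_ excludes association lists with duplicate keys: a Python dict argument can never
-- contain a duplicate key, so such lists represent no input A is ever called on.
def Pre_check_periodicity (combined_keys : List (Int × Int)) (max_period : Int) : Prop :=
  (combined_keys.map Prod.fst).Nodup
instance (combined_keys : List (Int × Int)) (max_period : Int) : Decidable (Pre_check_periodicity combined_keys max_period) := by unfold Pre_check_periodicity; infer_instance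
def pvWitness_check_periodicity : (List (Int × Int)) × Int := ([(0, 1), (3, 1), (5, 2)], 6)

def Spec_check_periodicity (combined_keys : List (Int × Int)) (max_period : Int) (out : List (Int × Bool)) : Prop := out = check_periodicity_alt combined_keys max_period
instance (combined_keys : List (Int × Int)) (max_period : Int) (out : List (Int × Bool)) : Decidable (Spec_check_periodicity combined_keys max_period out) := by unfold Spec_check_periodicity; infer_instance

-- ===== CLAIM (what is proved, stated in full; the proofs are below) =====
def Claim_equal_check_periodicity : Prop := ∀ (combined_keys : List (Int × Int)) (max_period : Int), Dom_check_periodicity combined_keys max_period → Pre_check_periodicity combined_keys max_period → Spec_check_periodicity combined_keys max_period (check_periodicity combined_keys max_period)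

-- ===== LEMMAS AND PROOFS =====

theorem pvCheckGroups_eq_true (l : List (Int × PySem.Set Int)) :
    pvCheckGroups l = true ↔ ∀ rv ∈ l, PySem.Set.len rv.2 ≤ 1 := by
  induction l with
  | nil => simp [pvCheckGroups]
  | cons hd tl ih =>
    obtain ⟨r, vals⟩ := hd
    simp only [pvCheckGroups]
    split
    · next h =>
      simp only [Bool.false_eq_true, false_iff]
      intro hall
      exact absurd (hall (r, vals) (by simp)) (not_le.mpr h)
    · next h =>
      rw [ih]
      constructor
      · intro hall rv hrv
        rcases List.mem_cons.mp hrv with rfl | hrv'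
        · exact not_lt.mp h
        · exact hall rv hrv'
      · intro hall rv hrv
        exact hall rv (List.mem_cons_of_mem _ hrv)

theorem pv_mem_getD_groups (l : List Int) (k f : Int → Int) (g : PySem.Dict Int (PySem.Set Int)) (r v : Int) :
    v ∈ (l.foldl (fun g pos => g.modify (k pos) PySem.Set.empty (fun s => PySem.Set.add s (f pos))) g).getD r PySem.Set.empty
    ↔ v ∈ g.getD r PySem.Set.empty ∨ ∃ pos ∈ l, k pos = r ∧ f pos = v := by
  induction l generalizing g with
  | nil => simp
  | cons hd tl ih =>
    simp only [List.foldl_cons, ih, PySem.Dict.getD_modify, List.exists_mem_cons_iff]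
    by_cases h : r = k hd
    · rw [if_pos h]
      subst h
      simp only [PySem.Set.mem_add, eq_comm (a := v)]
      tauto
    · rw [if_neg h]
      have h' : ¬ (k hd = r) := fun hh => h hh.symm
      simp [h']

theorem pv_nodup_getD_groups (l : List Int) (k f : Int → Int) (g : PySem.Dict Int (PySem.Set Int)) (r : Int)
    (h : (g.getD r PySem.Set.empty).Nodup) :
    ((l.foldl (fun g pos => g.modify (k pos) PySem.Set.empty (fun s => PySem.Set.add s (f pos))) g).getD r PySem.Set.empty).Nodup := by
  induction l generalizing g with
  | nil => exact h
  | cons hd tl ih =>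
    simp only [List.foldl_cons]
    apply ih
    rw [PySem.Dict.getD_modify]
    split
    · next heq =>
        rw [heq] at h
        exact PySem.Set.nodup_add _ _ h
    · exact h

theorem pv_mem_bad_inner (l : List (Int × Int)) (pi : Int × Int) (s : PySem.Set Int) (v : Int) :
    (v ∈ l.foldl (fun (s : PySem.Set Int) pj => if pi.2 ≠ pj.2 then PySem.Set.add s |pi.1 - pj.1| else s) s)
    ↔ v ∈ s ∨ ∃ pj ∈ l, pi.2 ≠ pj.2 ∧ |pi.1 - pj.1| = v := by
  induction l generalizing s with
  | nil => simp
  | cons hd tl ih =>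
    simp only [List.foldl_cons, ih, List.exists_mem_cons_iff]
    by_cases h : pi.2 = hd.2 <;> simp [h, PySem.Set.mem_add] <;> tauto

theorem pv_mem_bad (l m : List (Int × Int)) (s : PySem.Set Int) (v : Int) :
    (v ∈ l.foldl (fun (s : PySem.Set Int) pi =>
        m.foldl (fun (s : PySem.Set Int) pj => if pi.2 ≠ pj.2 then PySem.Set.add s |pi.1 - pj.1| else s) s) s)
    ↔ v ∈ s ∨ ∃ pi ∈ l, ∃ pj ∈ m, pi.2 ≠ pj.2 ∧ |pi.1 - pj.1| = v := by
  induction l generalizing s with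
  | nil => simp
  | cons hd tl ih =>
    simp only [List.foldl_cons, ih, pv_mem_bad_inner, List.exists_mem_cons_iff]
    exact or_assoc

theorem pv_len_le_one_iff (s : List Int) (h : s.Nodup) :
    s.length ≤ 1 ↔ ∀ a ∈ s, ∀ b ∈ s, a = b := by
  match s with
  | [] => simp
  | [a] => simp
  | a :: b :: t =>
    simp only [List.nodup_cons, List.mem_cons] at h
    constructor
    · intro hl; simp at hl
    · intro hab
      exact absurd (hab a (by simp) b (by simp)) (fun he => h.1 (Or.inl he))

theorem pv_mod_eq_iff (i j p : Int) (hp : 0 < p) :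
    PySem.Int.mod i p = PySem.Int.mod j p ↔ PySem.Int.mod |i - j| p = 0 := by
  rw [PySem.Int.mod_eq_emod_of_pos hp, PySem.Int.mod_eq_emod_of_pos hp,
    PySem.Int.mod_eq_zero_iff_dvd, dvd_abs]
  constructor
  · intro h; exact dvd_sub_comm.mp (Int.ModEq.dvd h)
  · intro h; exact (Int.modEq_iff_dvd.mpr h).symm

-- A's per-period consistency flag, characterised: no residue class carries two different values
theorem pvA_iff (positions : List Int) (k vf : Int → Int) :
    (pvCheckGroups (positions.foldl
        (fun (g : PySem.Dict Int (PySem.Set Int)) pos =>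
          g.modify (k pos) PySem.Set.empty (fun s => PySem.Set.add s (vf pos))) PySem.Dict.empty).items = true)
    ↔ ∀ pos1 ∈ positions, ∀ pos2 ∈ positions, k pos1 = k pos2 → vf pos1 = vf pos2 := by
  have hknd : (positions.foldl
      (fun (g : PySem.Dict Int (PySem.Set Int)) pos =>
        g.modify (k pos) PySem.Set.empty (fun s => PySem.Set.add s (vf pos))) PySem.Dict.empty).keys.Nodup := by
    apply PySem.Dict.nodup_keys_foldl_modify_key
    simp
  have hkeys : (positions.foldl
      (fun (g : PySem.Dict Int (PySem.Set Int)) pos =>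
        g.modify (k pos) PySem.Set.empty (fun s => PySem.Set.add s (vf pos))) PySem.Dict.empty).keys
      = PySem.Set.ofList (positions.map k) := by
    rw [PySem.Dict.keys_foldl_modify_key]
    simp [PySem.Set.update_nil_left]
  have hnd1 : ∀ r : Int, ((positions.foldl
      (fun (g : PySem.Dict Int (PySem.Set Int)) pos =>
        g.modify (k pos) PySem.Set.empty (fun s => PySem.Set.add s (vf pos))) PySem.Dict.empty).getD r PySem.Set.empty).Nodup := by
    intro r
    apply pv_nodup_getD_groups
    simp
  rw [pvCheckGroups_eq_true, PySem.Dict.items_eq_map_keys _ hknd PySem.Set.empty,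
    List.forall_mem_map, hkeys]
  constructor
  · intro h pos1 h1 pos2 h2 hk
    have hr : k pos1 ∈ PySem.Set.ofList (positions.map k) := by
      rw [PySem.Set.mem_ofList]
      exact List.mem_map_of_mem h1
    have hlen := h _ hr
    simp only [PySem.Set.len] at hlen
    have hle : ((positions.foldl
        (fun (g : PySem.Dict Int (PySem.Set Int)) pos =>
          g.modify (k pos) PySem.Set.empty (fun s => PySem.Set.add s (vf pos))) PySem.Dict.empty).getD (k pos1) PySem.Set.empty).length ≤ 1 := by
      omega
    refine (pv_len_le_one_iff _ (hnd1 _)).mp hle (vf pos1) ?_ (vf pos2) ?_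
    · rw [pv_mem_getD_groups]
      exact Or.inr ⟨pos1, h1, rfl, rfl⟩
    · rw [pv_mem_getD_groups]
      exact Or.inr ⟨pos2, h2, hk.symm, rfl⟩
  · intro h r _
    simp only [PySem.Set.len]
    have hle : ((positions.foldl
        (fun (g : PySem.Dict Int (PySem.Set Int)) pos =>
          g.modify (k pos) PySem.Set.empty (fun s => PySem.Set.add s (vf pos))) PySem.Dict.empty).getD r PySem.Set.empty).length ≤ 1 := by
      rw [pv_len_le_one_iff _ (hnd1 r)]
      intro a ha b hb
      rw [pv_mem_getD_groups] at ha hb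
      rcases ha with ha | ⟨pos1, h1, hk1, hv1⟩
      · simp at ha
      rcases hb with hb | ⟨pos2, h2, hk2, hv2⟩
      · simp at hb
      rw [← hv1, ← hv2]
      exact h pos1 h1 pos2 h2 (hk1.trans hk2.symm)
    omega

-- B's per-period flag, characterised: p divides no conflicting position-difference
theorem pvB_iff (items : List (Int × Int)) (p : Int) :
    ((items.foldl (fun (s : PySem.Set Int) pi =>
        items.foldl (fun (s : PySem.Set Int) pj =>
          if pi.2 ≠ pj.2 then PySem.Set.add s |pi.1 - pj.1| else s) s) PySem.Set.empty).all
      (fun dd => PySem.Int.mod dd p != 0) = true)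
    ↔ ∀ pi ∈ items, ∀ pj ∈ items, pi.2 ≠ pj.2 → PySem.Int.mod |pi.1 - pj.1| p ≠ 0 := by
  rw [List.all_eq_true]
  constructor
  · intro h pi hi pj hj hne
    have hm : |pi.1 - pj.1| ∈ (items.foldl (fun (s : PySem.Set Int) pi =>
        items.foldl (fun (s : PySem.Set Int) pj =>
          if pi.2 ≠ pj.2 then PySem.Set.add s |pi.1 - pj.1| else s) s) PySem.Set.empty) := by
      rw [pv_mem_bad]
      exact Or.inr ⟨pi, hi, pj, hj, hne, rfl⟩
    simpa using h _ hm
  · intro h dd hdd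
    rw [pv_mem_bad] at hdd
    rcases hdd with hdd | ⟨pi, hi, pj, hj, hne, hv⟩
    · simp at hdd
    · simpa [← hv] using h pi hi pj hj hne

-- the per-period booleans of the two ports agree (keys of the dict are distinct, p > 0)
theorem pv_point (ck : List (Int × Int)) (p : Int) (hp : 0 < p) (hnd : (ck.map Prod.fst).Nodup) :
    pvCheckGroups ((PySem.List.sorted (PySem.Dict.mk ck).keys (fun x => x) false).foldl
        (fun (g : PySem.Dict Int (PySem.Set Int)) pos =>
          g.modify (PySem.Int.mod pos p) PySem.Set.empty
            (fun s => PySem.Set.add s ((PySem.Dict.mk ck).getD pos 0))) PySem.Dict.empty).items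
    = ((PySem.Dict.mk ck).items.foldl (fun (s : PySem.Set Int) pi =>
          (PySem.Dict.mk ck).items.foldl (fun (s : PySem.Set Int) pj =>
            if pi.2 ≠ pj.2 then PySem.Set.add s |pi.1 - pj.1| else s) s) PySem.Set.empty).all
        (fun dd => PySem.Int.mod dd p != 0) := by
  have hitems : (PySem.Dict.mk ck).items = ck := rfl
  have hkeysnd : (PySem.Dict.mk ck).keys.Nodup := hnd
  rw [Bool.eq_iff_iff,
    pvA_iff _ (fun pos => PySem.Int.mod pos p) (fun pos => (PySem.Dict.mk ck).getD pos 0),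
    pvB_iff]
  have hmem : ∀ x : Int, x ∈ PySem.List.sorted (PySem.Dict.mk ck).keys (fun x => x) false ↔
      x ∈ ck.map Prod.fst := fun x => PySem.List.mem_sorted _ _ _ _
  constructor
  · intro h pi hi pj hj hne hmod
    apply hne
    have h1 : pi.1 ∈ PySem.List.sorted (PySem.Dict.mk ck).keys (fun x => x) false :=
      (hmem _).mpr (List.mem_map_of_mem hi)
    have h2 : pj.1 ∈ PySem.List.sorted (PySem.Dict.mk ck).keys (fun x => x) false :=
      (hmem _).mpr (List.mem_map_of_mem hj)
    have := h pi.1 h1 pj.1 h2 ((pv_mod_eq_iff _ _ _ hp).mpr hmod)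
    rwa [PySem.Dict.getD_of_mem_items _ (hitems ▸ hi) hkeysnd,
      PySem.Dict.getD_of_mem_items _ (hitems ▸ hj) hkeysnd] at this
  · intro h pos1 h1 pos2 h2 hk
    rw [hmem, List.mem_map] at h1 h2
    obtain ⟨pi, hi, hpi⟩ := h1
    obtain ⟨pj, hj, hpj⟩ := h2
    subst hpi; subst hpj
    rw [PySem.Dict.getD_of_mem_items _ (hitems ▸ hi) hkeysnd,
      PySem.Dict.getD_of_mem_items _ (hitems ▸ hj) hkeysnd]
    by_contra hne
    exact h pi hi pj hj hne ((pv_mod_eq_iff _ _ _ hp).mp hk)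

-- ===== VERDICT (by name: the statement is the Claim_ definition above) =====
theorem check_periodicity_spec : Claim_equal_check_periodicity := by
  intro ck mp _ hpre
  show check_periodicity ck mp = check_periodicity_alt ck mp
  simp only [check_periodicity, check_periodicity_alt]
  rw [PySem.Dict.items_foldl_insert_fresh (PySem.List.pyRange 2 (mp + 1) 1) (fun p => p) _ PySem.Dict.empty
      (fun a _ => PySem.Dict.contains_empty a)
      (by simpa using PySem.List.nodup_pyRange_one 2 (mp + 1))]
  rw [show (PySem.Dict.empty : PySem.Dict Int Bool).items = [] from rfl, List.nil_append]
  apply List.map_congr_left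
  intro p hp
  have h2 : (2 : Int) ≤ p := (PySem.List.mem_pyRange_one.mp hp).1
  exact congrArg (Prod.mk p) (pv_point ck p (by omega) hpre)
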